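-- pv_equiv track=rewrite | github.com/networktocode/cisco-test-modules | library/nxos_bgp_neighbor_af_facts.py | get_custom_value
-- ===== SOURCE A (Python) =====
-- def get_custom_value(arg, config, module):
--     splitted_config = config.splitlines()
--     REGEX = '.*send-community(\s(?P<modifier>\w+)).*'
--     value = ''
--
--     for line in splitted_config:
--         if 'send-community' in line:
--             splitted_line = line.split()
--             if len(splitted_line) == 1:
--                 value = 'none'
--             else:
--                 value = splitted_line[1]
--     return value
-- ===== SOURCE B (Python) =====
-- def get_custom_value(arg, config, module):
--     for line in reversed(config.splitlines()):
--         if 'send-community' in line: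
--             parts = line.split()
--             return 'none' if len(parts) == 1 else parts[1]
--     return ''
-- ===== Notes on version B (the rewrite author's own statement) =====
-- stated objective: alternative
-- what changed: Replaces A's overwrite-accumulator scan over all lines with a reverse scan that returns immediately at the first (i.e. last) line containing 'send-community'.
import Mathlib
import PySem

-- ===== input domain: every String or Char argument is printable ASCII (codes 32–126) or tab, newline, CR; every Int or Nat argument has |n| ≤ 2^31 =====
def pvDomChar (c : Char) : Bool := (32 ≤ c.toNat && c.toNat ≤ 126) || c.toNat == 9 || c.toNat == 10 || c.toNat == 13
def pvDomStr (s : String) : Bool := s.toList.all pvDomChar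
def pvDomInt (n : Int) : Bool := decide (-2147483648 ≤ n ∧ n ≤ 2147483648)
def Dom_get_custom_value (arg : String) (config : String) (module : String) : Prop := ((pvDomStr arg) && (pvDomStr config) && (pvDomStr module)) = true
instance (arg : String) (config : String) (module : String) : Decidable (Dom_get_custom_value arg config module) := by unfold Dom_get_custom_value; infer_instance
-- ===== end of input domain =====

-- B replaces A's overwrite-the-accumulator scan of every line with a reverse scan that
-- returns at the first matching line; same cost class, early-terminating decomposition.

-- ===== PORT A =====
-- A: scan all lines, overwriting `value` at each line containing 'send-community'.
-- splitted_line[1]: when the branch is reached the line contains 'send-community', so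
-- split() is nonempty; with length ≠ 1 index 1 exists — .getD "" is unreachable.
def get_custom_value (arg : String) (config : String) (module : String) : String :=
  (PySem.Str.splitlines config).foldl
    (fun value line =>
      if PySem.Str.isIn "send-community" line then
        let splitted_line := PySem.Str.split₀ line
        if splitted_line.length = 1 then "none"
        else (PySem.List.pyGet? splitted_line 1).getD ""
      else value) ""

-- ===== PORT B =====
-- B helper: the value extracted from a matching line.
def pvExtract (line : String) : String :=
  let parts := PySem.Str.split₀ line
  if parts.length = 1 then "none" else (PySem.List.pyGet? parts 1).getD ""

-- B helper: early-returning scan — first matching line wins.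
def pvScan : List String → String
  | [] => ""
  | line :: rest =>
    if PySem.Str.isIn "send-community" line then pvExtract line else pvScan rest

def get_custom_value_alt (arg : String) (config : String) (module : String) : String :=
  pvScan (PySem.Str.splitlines config).reverse

-- ===== PRECONDITION & SPEC =====
def Spec_get_custom_value (arg : String) (config : String) (module : String) (out : String) : Prop := out = get_custom_value_alt arg config module
instance (arg : String) (config : String) (module : String) (out : String) : Decidable (Spec_get_custom_value arg config module out) := by unfold Spec_get_custom_value; infer_instance

-- ===== CLAIM (what is proved, stated in full; the proofs are below) =====
def Claim_equal_get_custom_value : Prop := ∀ (arg : String) (config : String) (module : String), Dom_get_custom_value arg config module → Spec_get_custom_value arg config module (get_custom_value arg config module)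

-- ===== LEMMAS AND PROOFS =====

-- pvScan is `find?` then extract.
theorem pvScan_eq_find? (ls : List String) :
    pvScan ls = match ls.find? (fun l => PySem.Str.isIn "send-community" l) with
                | some l => pvExtract l
                | none => "" := by
  induction ls with
  | nil => rfl
  | cons hd tl ih =>
    simp only [pvScan, List.find?_cons]
    by_cases h : PySem.Str.isIn "send-community" hd = true
    all_goals simp [PySem.Str.isIn] at h
    · simp [h]
    · simp [h, ih]

-- A's overwriting fold equals extract of the LAST matching line (first of the reverse).
theorem foldl_overwrite_eq (ls : List String) (init : String) :
    ls.foldl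
      (fun value line =>
        if PySem.Str.isIn "send-community" line then
          let splitted_line := PySem.Str.split₀ line
          if splitted_line.length = 1 then "none"
          else (PySem.List.pyGet? splitted_line 1).getD ""
        else value) init
    = match ls.reverse.find? (fun l => PySem.Str.isIn "send-community" l) with
      | some l => pvExtract l
      | none => init := by
  induction ls generalizing init with
  | nil => rfl
  | cons hd tl ih =>
    simp only [List.foldl_cons, List.reverse_cons, List.find?_append, ih]
    cases tl.reverse.find? (fun l => PySem.Str.isIn "send-community" l) with
    | some l => simp
    | none =>
      by_cases h : PySem.Str.isIn "send-community" hd = true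
      all_goals simp [PySem.Str.isIn] at h
      · simp [h, pvExtract]
      · simp [h]

-- ===== VERDICT (by name: the statement is the Claim_ definition above) =====
theorem get_custom_value_spec : Claim_equal_get_custom_value := by
  intro arg config module _
  show get_custom_value arg config module = get_custom_value_alt arg config module
  rw [get_custom_value, get_custom_value_alt, foldl_overwrite_eq, pvScan_eq_find?]
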